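-- pv_equiv track=rewrite | github.com/luizancard/error-autopsy | src/interface/streamlit/history_components.py | get_unique_values
-- ===== SOURCE A (Python) =====
-- from typing import Any, Dict, List, Optional, Set
--
-- def get_unique_values(data: List[Dict[str, Any]]) -> Dict[str, List[str]]:
--     """
--     Extract unique subjects and topics from database.
--
--     Args:
--         data: List of error records.
--
--     Returns:
--         Dictionary with 'subjects' and 'topics' lists.
--     """
--     subjects: Set[str] = set()
--     topics: Set[str] = set()
--     exam_types: Set[str] = set()
--
--     for record in data:
--         subject = record.get("subject", "").strip()
--         topic = record.get("topic", "").strip()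
--         etype = record.get("exam_type", "").strip()
--
--         if subject:
--             subjects.add(subject)
--         if topic:
--             topics.add(topic)
--         if etype:
--             exam_types.add(etype)
--
--     return {
--         "subjects": sorted(list(subjects)),
--         "topics": sorted(list(topics)),
--         "exam_types": sorted(list(exam_types)),
--     }
-- ===== SOURCE B (Python) =====
-- from typing import Any, Dict, List
--
-- def get_unique_values(data: List[Dict[str, Any]]) -> Dict[str, List[str]]:
--     """Sort-then-scan: no sets; sort all stripped values, then one linear pass
--     that skips empties and adjacent duplicates."""
--     def uniq(field: str) -> List[str]:
--         vals = sorted(r.get(field, "").strip() for r in data)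
--         out: List[str] = []
--         for v in vals:
--             if v and (not out or out[-1] != v):
--                 out.append(v)
--         return out
--     return {
--         "subjects": uniq("subject"),
--         "topics": uniq("topic"),
--         "exam_types": uniq("exam_type"),
--     }
-- ===== Notes on version B (the rewrite author's own statement) =====
-- stated objective: alternative
-- what changed: Replaces A's hash-set accumulation followed by sorting with a sort-then-scan algorithm: for each field all stripped values are sorted first and a single linear pass drops empties and adjacent duplicates, using no sets at all.
import Mathlib
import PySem

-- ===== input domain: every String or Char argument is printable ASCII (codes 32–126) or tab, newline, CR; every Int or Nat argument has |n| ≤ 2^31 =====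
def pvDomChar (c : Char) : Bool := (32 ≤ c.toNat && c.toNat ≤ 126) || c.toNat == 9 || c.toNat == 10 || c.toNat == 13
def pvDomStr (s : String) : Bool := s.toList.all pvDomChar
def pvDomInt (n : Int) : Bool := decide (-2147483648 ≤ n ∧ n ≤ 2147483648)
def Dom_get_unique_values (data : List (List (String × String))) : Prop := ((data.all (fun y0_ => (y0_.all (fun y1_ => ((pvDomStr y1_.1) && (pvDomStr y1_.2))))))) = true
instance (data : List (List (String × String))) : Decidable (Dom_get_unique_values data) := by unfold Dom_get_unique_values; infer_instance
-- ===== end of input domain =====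

-- B replaces A's per-field set accumulation followed by sorting with sort-then-scan:
-- sort all stripped values first, then one linear pass drops empties and adjacent
-- duplicates; no sets are used (objective: alternative algorithm, same cost).

-- ===== PORT A =====
def get_unique_values (data : List (List (String × String))) : List (String × List String) :=
  let st := data.foldl (fun (acc : PySem.Set String × PySem.Set String × PySem.Set String) record =>
    let subject := PySem.Str.strip (PySem.Dict.getD (PySem.Dict.mk record) "subject" "")
    let topic := PySem.Str.strip (PySem.Dict.getD (PySem.Dict.mk record) "topic" "")
    let etype := PySem.Str.strip (PySem.Dict.getD (PySem.Dict.mk record) "exam_type" "")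
    let s := if subject ≠ "" then PySem.Set.add acc.1 subject else acc.1
    let t := if topic ≠ "" then PySem.Set.add acc.2.1 topic else acc.2.1
    let e := if etype ≠ "" then PySem.Set.add acc.2.2 etype else acc.2.2
    (s, t, e))
    (PySem.Set.empty, PySem.Set.empty, PySem.Set.empty)
  [("subjects", PySem.List.sorted st.1 (fun x => x) false),
   ("topics", PySem.List.sorted st.2.1 (fun x => x) false),
   ("exam_types", PySem.List.sorted st.2.2 (fun x => x) false)]

-- ===== PORT B =====
-- vals = sorted(r.get(field, "").strip() for r in data); then one linear scan
-- appending v exactly when v is non-empty and (out is empty or out[-1] != v)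
def pvUniqB (data : List (List (String × String))) (field : String) : List String :=
  let vals := PySem.List.sorted
    (data.map (fun r => PySem.Str.strip (PySem.Dict.getD (PySem.Dict.mk r) field "")))
    (fun x => x) false
  vals.foldl (fun out v =>
    if v ≠ "" ∧ (out = [] ∨ out.getLast? ≠ some v) then out ++ [v] else out) []

def get_unique_values_alt (data : List (List (String × String))) : List (String × List String) :=
  [("subjects", pvUniqB data "subject"),
   ("topics", pvUniqB data "topic"),
   ("exam_types", pvUniqB data "exam_type")]

-- ===== PRECONDITION & SPEC =====
def Spec_get_unique_values (data : List (List (String × String))) (out : List (String × List String)) : Prop := out = get_unique_values_alt data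
instance (data : List (List (String × String))) (out : List (String × List String)) : Decidable (Spec_get_unique_values data out) := by unfold Spec_get_unique_values; infer_instance

-- ===== CLAIM (what is proved, stated in full; the proofs are below) =====
def Claim_equal_get_unique_values : Prop := ∀ (data : List (List (String × String))), Dom_get_unique_values data → Spec_get_unique_values data (get_unique_values data)

-- ===== LEMMAS AND PROOFS =====

-- the per-field value extracted from one record
def pvVal (field : String) (r : List (String × String)) : String :=
  PySem.Str.strip (PySem.Dict.getD (PySem.Dict.mk r) field "")

-- in a strictly increasing list every element is at most the last one
lemma pv_mem_le_getLast (l : List String) (h : l.Pairwise (· < ·)) (x : String)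
    (hx : x ∈ l) (hne : l ≠ []) : x ≤ l.getLast hne := by
  induction l with
  | nil => simp at hx
  | cons a t ih =>
      rcases List.pairwise_cons.mp h with ⟨ha, ht⟩
      cases t with
      | nil => simp at hx; simp [hx, List.getLast]
      | cons b t' =>
          rw [List.getLast_cons (by simp)]
          rcases List.mem_cons.mp hx with rfl | hx'
          · exact le_of_lt (ha _ (List.getLast_mem _))
          · exact ih ht hx' (by simp)

-- A's conditional set fold: membership
lemma pvA_mem (vals : List String) (acc : List String) (x : String) :
    x ∈ vals.foldl (fun s v => if v ≠ "" then PySem.Set.add s v else s) acc ↔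
      x ∈ acc ∨ (x ∈ vals ∧ x ≠ "") := by
  induction vals generalizing acc with
  | nil => simp
  | cons v vs ih =>
      simp only [List.foldl_cons, ih]
      by_cases hv : v = ""
      · simp [hv]; tauto
      · simp only [ne_eq, hv, not_false_eq_true, if_pos, PySem.Set.mem_add, List.mem_cons]
        constructor
        · rintro ((h | rfl) | ⟨h, h2⟩)
          · tauto
          · exact Or.inr ⟨Or.inl rfl, hv⟩
          · tauto
        · rintro (h | ⟨h | h, h2⟩) <;> tauto

-- A's conditional set fold: nodup
lemma pvA_nodup (vals : List String) (acc : List String) (h : acc.Nodup) :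
    (vals.foldl (fun s v => if v ≠ "" then PySem.Set.add s v else s) acc).Nodup := by
  induction vals generalizing acc with
  | nil => exact h
  | cons v vs ih =>
      simp only [List.foldl_cons]
      split_ifs with hv
      · exact ih _ (PySem.Set.nodup_add _ _ h)
      · exact ih _ h

-- B's dedupe scan over a ≤-sorted list: the result is strictly increasing,
-- contains no empty string, and holds exactly out ∪ (nonempty elements of vals)
lemma pvB_scan (vals : List String) (out : List String)
    (hs : vals.Pairwise (· ≤ ·)) (hout : out.Pairwise (· < ·))
    (hne : "" ∉ out) (hle : ∀ o ∈ out, ∀ v ∈ vals, o ≤ v) :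
    (vals.foldl (fun out v =>
      if v ≠ "" ∧ (out = [] ∨ out.getLast? ≠ some v) then out ++ [v] else out) out).Pairwise (· < ·) ∧
    "" ∉ (vals.foldl (fun out v =>
      if v ≠ "" ∧ (out = [] ∨ out.getLast? ≠ some v) then out ++ [v] else out) out) ∧
    (∀ x, x ∈ (vals.foldl (fun out v =>
      if v ≠ "" ∧ (out = [] ∨ out.getLast? ≠ some v) then out ++ [v] else out) out) ↔
        x ∈ out ∨ (x ∈ vals ∧ x ≠ "")) := by
  induction vals generalizing out with
  | nil => exact ⟨hout, hne, by simp⟩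
  | cons v vs ih =>
      simp only [List.foldl_cons]
      rcases List.pairwise_cons.mp hs with ⟨hv_le, hs'⟩
      by_cases hc : v ≠ "" ∧ (out = [] ∨ out.getLast? ≠ some v)
      · rw [if_pos hc]
        have hlt : ∀ o ∈ out, o < v := by
          intro o ho
          have hole : o ≤ v := hle o ho v (by simp)
          rcases lt_or_eq_of_le hole with h | h
          · exact h
          · exfalso
            rcases hc.2 with h0 | h0
            · simp [h0] at ho
            · have hne' : out ≠ [] := by intro h'; simp [h'] at ho
              have hgl : out.getLast hne' ∈ out := List.getLast_mem hne'
              have h1 : o ≤ out.getLast hne' := pv_mem_le_getLast out hout o ho hne'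
              have h2 : out.getLast hne' ≤ v := hle _ hgl v (by simp)
              have h3 : out.getLast? = some (out.getLast hne') := List.getLast?_eq_some_getLast hne'
              apply h0
              rw [h3]
              exact congrArg some (le_antisymm h2 (h ▸ h1))
        have hout' : (out ++ [v]).Pairwise (· < ·) := by
          rw [List.pairwise_append]
          exact ⟨hout, by simp, by simpa using hlt⟩
        have hne'' : "" ∉ out ++ [v] := by
          simp only [List.mem_append, List.mem_singleton]
          rintro (h | h)
          · exact hne h
          · exact hc.1 h.symm
        have hle' : ∀ o ∈ out ++ [v], ∀ w ∈ vs, o ≤ w := by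
          intro o ho w hw
          rcases List.mem_append.mp ho with h | h
          · exact hle o h w (List.mem_cons_of_mem _ hw)
          · simp at h; subst h; exact hv_le w hw
        obtain ⟨p1, p2, p3⟩ := ih (out ++ [v]) hs' hout' hne'' hle'
        refine ⟨p1, p2, fun x => ?_⟩
        rw [p3 x]
        simp only [List.mem_append, List.mem_cons, List.not_mem_nil, or_false]
        constructor
        · rintro ((h | rfl) | ⟨h, h2⟩)
          · exact Or.inl h
          · exact Or.inr ⟨Or.inl rfl, hc.1⟩
          · exact Or.inr ⟨Or.inr h, h2⟩
        · rintro (h | ⟨h | h, h2⟩)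
          · exact Or.inl (Or.inl h)
          · exact Or.inl (Or.inr h)
          · exact Or.inr ⟨h, h2⟩
      · rw [if_neg hc]
        have hle' : ∀ o ∈ out, ∀ w ∈ vs, o ≤ w :=
          fun o ho w hw => hle o ho w (List.mem_cons_of_mem _ hw)
        obtain ⟨p1, p2, p3⟩ := ih out hs' hout hne hle'
        refine ⟨p1, p2, fun x => ?_⟩
        rw [p3 x]
        push Not at hc
        by_cases hv : v = ""
        · subst hv
          simp only [List.mem_cons]
          constructor
          · rintro (h | ⟨h, h2⟩)
            · exact Or.inl h
            · exact Or.inr ⟨Or.inr h, h2⟩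
          · rintro (h | ⟨h | h, h2⟩)
            · exact Or.inl h
            · exact absurd h h2
            · exact Or.inr ⟨h, h2⟩
        · obtain ⟨hone, hgl⟩ := hc hv
          have hvout : v ∈ out := by
            have h3 : out.getLast? = some (out.getLast hone) := List.getLast?_eq_some_getLast hone
            have hv' : v = out.getLast hone := Option.some_injective _ (hgl.symm.trans h3)
            rw [hv']; exact List.getLast_mem hone
          simp only [List.mem_cons]
          constructor
          · rintro (h | ⟨h, h2⟩)
            · exact Or.inl h
            · exact Or.inr ⟨Or.inr h, h2⟩
          · rintro (h | ⟨h | h, h2⟩)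
            · exact Or.inl h
            · exact Or.inl (h ▸ hvout)
            · exact Or.inr ⟨h, h2⟩

-- per field: sorting A's set equals B's sort-then-scan
lemma pv_field (vals : List String) :
    PySem.List.sorted
      (vals.foldl (fun s v => if v ≠ "" then PySem.Set.add s v else s) PySem.Set.empty)
      (fun x => x) false =
    (PySem.List.sorted vals (fun x => x) false).foldl (fun out v =>
      if v ≠ "" ∧ (out = [] ∨ out.getLast? ≠ some v) then out ++ [v] else out) [] := by
  set S := PySem.List.sorted vals (fun x => x) false with hS
  have hsp : S.Pairwise (· ≤ ·) := PySem.List.sorted_pairwise vals (fun x => x)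
  obtain ⟨p1, p2, p3⟩ := pvB_scan S [] hsp (by simp) (by simp) (by simp)
  set B := S.foldl (fun out v =>
    if v ≠ "" ∧ (out = [] ∨ out.getLast? ≠ some v) then out ++ [v] else out) [] with hB
  set A := vals.foldl (fun s v => if v ≠ "" then PySem.Set.add s v else s) PySem.Set.empty with hA
  have hmemS : ∀ x, x ∈ S ↔ x ∈ vals := fun x => PySem.List.mem_sorted vals _ _ x
  have hBnodup : B.Nodup := List.Pairwise.imp (fun h => ne_of_lt h) p1
  have hAnodup : A.Nodup := pvA_nodup vals PySem.Set.empty (by simp [PySem.Set.empty])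
  have hperm : B.Perm A := by
    refine (List.perm_ext_iff_of_nodup hBnodup hAnodup).mpr (fun a => ?_)
    rw [p3 a, pvA_mem vals PySem.Set.empty a, hmemS a]
    simp [PySem.Set.empty]
  exact PySem.List.sorted_eq_of_perm_of_pairwise_lt A B (fun x => x) hperm p1

-- A's triple loop splits into three independent per-field folds
lemma pv_fold_split (data : List (List (String × String)))
    (s t e : PySem.Set String) :
    data.foldl (fun (acc : PySem.Set String × PySem.Set String × PySem.Set String) record =>
      let subject := pvVal "subject" record
      let topic := pvVal "topic" record
      let etype := pvVal "exam_type" record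
      (if subject ≠ "" then PySem.Set.add acc.1 subject else acc.1,
       if topic ≠ "" then PySem.Set.add acc.2.1 topic else acc.2.1,
       if etype ≠ "" then PySem.Set.add acc.2.2 etype else acc.2.2)) (s, t, e) =
    ((data.map (pvVal "subject")).foldl (fun s v => if v ≠ "" then PySem.Set.add s v else s) s,
     (data.map (pvVal "topic")).foldl (fun s v => if v ≠ "" then PySem.Set.add s v else s) t,
     (data.map (pvVal "exam_type")).foldl (fun s v => if v ≠ "" then PySem.Set.add s v else s) e) := by
  induction data generalizing s t e with
  | nil => rfl
  | cons r rs ih => simp only [List.foldl_cons, List.map_cons, ih]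

-- ===== VERDICT (by name: the statement is the Claim_ definition above) =====
theorem get_unique_values_spec : Claim_equal_get_unique_values := by
  intro data _
  show get_unique_values data = get_unique_values_alt data
  unfold get_unique_values get_unique_values_alt pvUniqB
  have hsplit := pv_fold_split data PySem.Set.empty PySem.Set.empty PySem.Set.empty
  simp only [pvVal] at hsplit
  simp only [hsplit]
  rw [pv_field, pv_field, pv_field]
  rfl
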